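-- pv_equiv track=rewrite | github.com/VyacheslavZalygin/PyEducation2021 | ReshuEGE/5/arithmometer/3406.py | f
-- ===== SOURCE A (Python) =====
-- def f(n):
--     if n == 729:
--         return [""]
--     if n > 729:
--         return ["NO WAY"]
--     a = ["1"+x for x in f(n+1)]
--     a.extend(["2"+x for x in f(n*2)])
--     return a
-- ===== SOURCE B (Python) =====
-- def f(n):
--     if n >= 729:
--         return [""] if n == 729 else ["NO WAY"]
--     # bottom-up table: tails[j] holds the answer for value (k+1)+j, built from 729 down to n
--     tails = [[""]]
--     for k in range(728, n - 1, -1):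
--         d = tails[k - 1] if 2 * k <= 729 else ["NO WAY"]
--         tails.insert(0, ["1" + x for x in tails[0]] + ["2" + y for y in d])
--     return tails[0]
-- ===== Notes on version B (the rewrite author's own statement) =====
-- stated objective: alternative
-- what changed: replaces A's top-down branching recursion (which re-visits shared states once per path) with a single bottom-up loop that tabulates the answer list for every value from 729 down to n, reading the x2 branch out of the table
-- outside the precondition, e.g. on f(0): A does not finish within the time limit
import Mathlib
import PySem

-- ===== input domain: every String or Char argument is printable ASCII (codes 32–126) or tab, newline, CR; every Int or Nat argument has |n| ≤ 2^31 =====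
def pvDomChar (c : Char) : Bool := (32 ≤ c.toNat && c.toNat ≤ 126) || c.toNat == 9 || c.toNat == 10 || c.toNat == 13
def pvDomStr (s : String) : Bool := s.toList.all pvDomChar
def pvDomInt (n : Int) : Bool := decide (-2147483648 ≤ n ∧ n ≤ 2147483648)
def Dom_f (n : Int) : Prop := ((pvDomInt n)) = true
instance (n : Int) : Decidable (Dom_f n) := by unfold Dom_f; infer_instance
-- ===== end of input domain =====

-- B replaces A's top-down branching recursion by one bottom-up pass tabulating the
-- answer for every value from 729 down to n (alternative decomposition, not faster:
-- the output size dominates both).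

-- ===== PORT A =====
-- fuel only makes A's recursion structural; fuel 1000 suffices for every n ≥ 1
-- (Python's recursion depth from such n is at most 729), proved by fAux_irrel below.
def fAux : Nat → Int → List String
  | 0, _ => []
  | (fuel+1), n =>
    if n = 729 then [""]
    else if n > 729 then ["NO WAY"]
    else ((fAux fuel (n+1)).map (fun x => "1" ++ x))
          ++ ((fAux fuel (n*2)).map (fun x => "2" ++ x))

def f (n : Int) : List String := fAux 1000 n

-- ===== PORT B =====
-- loop body: tails[j] holds the answer for value (k+1)+j; prepend the answer for k
def fStep (tails : List (List String)) (k : Int) : List (List String) :=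
  let d := if 2*k ≤ 729 then (PySem.List.pyGet? tails (k-1)).getD [] else ["NO WAY"]
  ((((PySem.List.pyGet? tails 0).getD []).map (fun x => "1" ++ x))
    ++ (d.map (fun y => "2" ++ y))) :: tails

def f_alt (n : Int) : List String :=
  if n ≥ 729 then (if n = 729 then [""] else ["NO WAY"])
  else
    let tails := (PySem.List.pyRange 728 (n-1) (-1)).foldl fStep [[""]]
    (PySem.List.pyGet? tails 0).getD []

-- ===== PRECONDITION & SPEC =====
-- Pre_f excludes n ≤ 0, on which Python A never returns (its recursion grows without bound).
def Pre_f (n : Int) : Prop := 1 ≤ n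
instance (n : Int) : Decidable (Pre_f n) := by unfold Pre_f; infer_instance
def pvWitness_f : Int := (729)

def Spec_f (n : Int) (out : List String) : Prop := out = f_alt n
instance (n : Int) (out : List String) : Decidable (Spec_f n out) := by unfold Spec_f; infer_instance

-- ===== CLAIM (what is proved, stated in full; the proofs are below) =====
def Claim_equal_f : Prop := ∀ (n : Int), Dom_f n → Pre_f n → Spec_f n (f n)

-- ===== LEMMAS AND PROOFS =====

lemma fAux_succ (fuel : Nat) (n : Int) :
    fAux (fuel+1) n = if n = 729 then [""]
      else if n > 729 then ["NO WAY"]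
      else ((fAux fuel (n+1)).map (fun x => "1" ++ x))
            ++ ((fAux fuel (n*2)).map (fun x => "2" ++ x)) := rfl

lemma fAux_irrel (f1 : Nat) : ∀ (f2 : Nat) (n : Int), 1 ≤ n →
    (730 - n).toNat < f1 → (730 - n).toNat < f2 → fAux f1 n = fAux f2 n := by
  induction f1 with
  | zero => intro f2 n _ h1 _; omega
  | succ f1 ih =>
    intro f2 n hn h1 h2
    cases f2 with
    | zero => omega
    | succ f2 =>
      rw [fAux_succ, fAux_succ]
      by_cases h729 : n = 729
      · rw [if_pos h729, if_pos h729]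
      · rw [if_neg h729, if_neg h729]
        by_cases hgt : n > 729
        · rw [if_pos hgt, if_pos hgt]
        · rw [if_neg hgt, if_neg hgt,
              ih f2 (n+1) (by omega) (by omega) (by omega),
              ih f2 (n*2) (by omega) (by omega) (by omega)]

lemma f_729 : f 729 = [""] := by
  show fAux (999+1) 729 = _
  rw [fAux_succ, if_pos rfl]

lemma f_gt (n : Int) (h : 729 < n) : f n = ["NO WAY"] := by
  show fAux (999+1) n = _
  rw [fAux_succ, if_neg (by omega), if_pos h]

lemma f_rec (n : Int) (h1 : 1 ≤ n) (h2 : n < 729) :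
    f n = ((f (n+1)).map (fun x => "1" ++ x)) ++ ((f (n*2)).map (fun x => "2" ++ x)) := by
  show fAux (999+1) n = _
  rw [fAux_succ, if_neg (show ¬ n = 729 by omega), if_neg (show ¬ n > 729 by omega),
      fAux_irrel 999 1000 (n+1) (by omega) (by omega) (by omega),
      fAux_irrel 999 1000 (n*2) (by omega) (by omega) (by omega)]
  rfl

lemma pyRange_neg_one_snoc (a b : Int) (h : b ≤ a) :
    PySem.List.pyRange a (b-1) (-1) = PySem.List.pyRange a b (-1) ++ [b] := by
  rw [PySem.List.pyRange_neg_one, PySem.List.pyRange_neg_one,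
      show (a - (b-1)).toNat = (a-b).toNat + 1 by omega, List.range_succ, List.map_append]
  simp only [List.map_cons, List.map_nil]
  congr 2
  omega

-- row m c = [f m, f (m+1), …, f (m+c)]: the contents of B's table after the loop
-- has processed all values down to m (with m + c = 729)
def row : Int → Nat → List (List String)
  | m, 0 => [f m]
  | m, (c+1) => f m :: row (m+1) c

lemma row_get : ∀ (c k : Nat) (m : Int), k ≤ c → (row m c)[k]? = some (f (m + (k:Int))) := by
  intro c
  induction c with
  | zero =>
    intro k m hk
    have hk0 : k = 0 := by omega
    subst hk0
    simp [row]
  | succ c ih =>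
    intro k m hk
    cases k with
    | zero => simp [row]
    | succ k =>
      rw [show row m (c+1) = f m :: row (m+1) c from rfl, List.getElem?_cons_succ,
          ih k (m+1) (by omega)]
      congr 2
      push_cast
      ring

lemma loop_inv (c : Nat) : c ≤ 728 →
    (PySem.List.pyRange 728 (728 - (c:Int)) (-1)).foldl fStep [[""]]
      = row (729 - (c:Int)) c := by
  induction c with
  | zero =>
    intro _
    simp only [Nat.cast_zero, sub_zero]
    rw [PySem.List.pyRange_neg_one_eq_nil le_rfl]
    simp [row, f_729]
  | succ c ih =>
    intro hc
    rw [show (728 : Int) - ((c+1 : Nat) : Int) = (728 - (c:Int)) - 1 by push_cast; ring,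
        pyRange_neg_one_snoc 728 (728 - (c:Int)) (by omega), List.foldl_append,
        ih (by omega), List.foldl_cons, List.foldl_nil]
    set m : Int := 728 - (c:Int) with hm_def
    have h729c : (729 : Int) - (c:Int) = m + 1 := by omega
    rw [h729c, show (729 : Int) - ((c+1 : Nat) : Int) = m by push_cast; omega]
    simp only [fStep]
    rw [PySem.List.pyGet?_zero, row_get c 0 (m+1) (by omega)]
    simp only [Nat.cast_zero, add_zero]
    have hd : (if 2*m ≤ 729 then
          (PySem.List.pyGet? (row (m+1) c) (m-1)).getD [] else ["NO WAY"])
        = f (m*2) := by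
      by_cases h2 : 2*m ≤ 729
      · rw [if_pos h2, PySem.List.pyGet?_of_nonneg _ (by omega),
            row_get c (m-1).toNat (m+1) (by omega), Option.getD_some]
        congr 1
        omega
      · rw [if_neg h2, f_gt (m*2) (by omega)]
    rw [hd, Option.getD_some,
        show row m (c+1) = f m :: row (m+1) c from rfl,
        ← f_rec m (by omega) (by omega)]

-- ===== VERDICT (by name: the statement is the Claim_ definition above) =====
theorem f_spec : Claim_equal_f := by
  intro n _ hpre
  have hn : (1:Int) ≤ n := hpre
  unfold Spec_f f_alt
  by_cases hge : n ≥ 729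
  · rw [if_pos hge]
    by_cases h729 : n = 729
    · rw [if_pos h729, h729, f_729]
    · rw [if_neg h729, f_gt n (by omega)]
  · rw [if_neg hge]
    show f n = (PySem.List.pyGet?
      ((PySem.List.pyRange 728 (n-1) (-1)).foldl fStep [[""]]) 0).getD []
    have hc : ((729 - n).toNat : Int) = 729 - n := by omega
    have hinv := loop_inv (729 - n).toNat (by omega)
    rw [show (728 : Int) - (((729 - n).toNat : Nat) : Int) = n - 1 by omega] at hinv
    rw [hinv, PySem.List.pyGet?_zero,
        row_get (729 - n).toNat 0 (729 - ((729 - n).toNat : Int)) (by omega),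
        Option.getD_some]
    congr 1
    omega
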